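-- pv_equiv track=rewrite | github.com/sanidhya12345/pythoncode | dp/ThreeStrings.py | solve
-- ===== SOURCE A (Python) =====
-- def solve(a, b, c):
--     n, m = len(a), len(b)
--
--     # Initialize DP table
--     dp = [[0] * (m + 1) for _ in range(n + 1)]
--
--     # Fill DP table
--     for i in range(n + 1):
--         for j in range(m + 1):
--             if i == 0 and j == 0:
--                 dp[i][j] = 0
--             elif i == 0:
--                 dp[i][j] = dp[i][j-1] + (b[j-1] == c[i+j-1])
--             elif j == 0:
--                 dp[i][j] = dp[i-1][j] + (a[i-1] == c[i+j-1])
--             else: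
--                 dp[i][j] = max(dp[i-1][j] + (a[i-1] == c[i+j-1]), dp[i][j-1] + (b[j-1] == c[i+j-1]))
--
--     # Minimum changes required
--     return (n + m) - dp[n][m]
-- ===== SOURCE B (Python) =====
-- def solve(a, b, c):
--     # Demand-driven evaluation: iterative depth-first traversal from the goal
--     # cell (n, m) with an explicit stack, a visited set and a memo dict; only
--     # cells reachable from the goal are ever evaluated, in post-order.
--     n, m = len(a), len(b)
--     memo = {}
--     expanded = set()
--     stack = [(n, m, False)]
--     while stack:
--         i, j, ready = stack.pop()
--         if (i, j) in memo:
--             continue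
--         if ready:
--             if i == 0 and j == 0:
--                 v = 0
--             elif i == 0:
--                 v = memo[(0, j - 1)] + (b[j - 1] == c[j - 1])
--             elif j == 0:
--                 v = memo[(i - 1, 0)] + (a[i - 1] == c[i - 1])
--             else:
--                 v = max(memo[(i - 1, j)] + (a[i - 1] == c[i + j - 1]),
--                         memo[(i, j - 1)] + (b[j - 1] == c[i + j - 1]))
--             memo[(i, j)] = v
--         elif (i, j) not in expanded:
--             expanded.add((i, j))
--             stack.append((i, j, True))
--             if i > 0:
--                 stack.append((i - 1, j, False))
--             if j > 0:
--                 stack.append((i, j - 1, False))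
--     return (n + m) - memo[(n, m)]
-- ===== Notes on version B (the rewrite author's own statement) =====
-- stated objective: alternative
-- what changed: Replaces A's bottom-up row-major table fill with a demand-driven iterative depth-first traversal from the goal cell (n,m): an explicit stack of (cell, ready) frames, a visited set and a memo dict evaluate cells in post-order.
import Mathlib
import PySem

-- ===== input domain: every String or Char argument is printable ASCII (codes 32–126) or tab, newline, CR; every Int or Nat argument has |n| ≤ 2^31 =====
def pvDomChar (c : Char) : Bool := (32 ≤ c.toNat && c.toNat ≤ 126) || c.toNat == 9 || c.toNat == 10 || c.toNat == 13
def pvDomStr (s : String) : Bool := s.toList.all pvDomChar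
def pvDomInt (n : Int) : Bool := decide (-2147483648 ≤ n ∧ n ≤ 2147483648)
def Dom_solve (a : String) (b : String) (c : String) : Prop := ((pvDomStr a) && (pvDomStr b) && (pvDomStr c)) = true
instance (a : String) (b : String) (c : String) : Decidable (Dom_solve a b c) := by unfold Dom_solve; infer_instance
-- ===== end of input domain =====

-- B replaces A's bottom-up row-major table fill by a demand-driven iterative DFS from the
-- goal cell (explicit stack + visited set + memo dict); objective: alternative, same O(n·m).

-- Python's int(x == y): 1 if the chars are equal, else 0 (used by both ports).
def pvInd (x y : Char) : Int := if x = y then 1 else 0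

-- ===== PORT A =====
-- One inner-loop step of A: compute dp[i][j] and store it (dp[i][j] = v is dp.set;
-- reads use getD with defaults that are never hit on in-range indices; the c[i+j-1]
-- access is in range exactly on Pre_solve, outside of which Python raises IndexError).
def rowStepA (al bl cl : List Char) (i : Nat) (dp : List (List Int)) (j : Nat) : List (List Int) :=
  let v : Int :=
    if i = 0 ∧ j = 0 then 0
    else if i = 0 then
      (dp.getD i []).getD (j-1) 0 + pvInd (bl.getD (j-1) ' ') (cl.getD (i+j-1) ' ')
    else if j = 0 then
      (dp.getD (i-1) []).getD j 0 + pvInd (al.getD (i-1) ' ') (cl.getD (i+j-1) ' ')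
    else
      max ((dp.getD (i-1) []).getD j 0 + pvInd (al.getD (i-1) ' ') (cl.getD (i+j-1) ' '))
          ((dp.getD i []).getD (j-1) 0 + pvInd (bl.getD (j-1) ' ') (cl.getD (i+j-1) ' '))
  dp.set i ((dp.getD i []).set j v)

-- Port of A: build the (n+1)×(m+1) table row by row (range(n+1) × range(m+1)).
def solve (a : String) (b : String) (c : String) : Int :=
  let al := a.toList
  let bl := b.toList
  let cl := c.toList
  let n := al.length
  let m := bl.length
  let dp := (List.range (n+1)).foldl
      (fun dp i => (List.range (m+1)).foldl (rowStepA al bl cl i) dp)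
      (List.replicate (n+1) (List.replicate (m+1) (0 : Int)))
  ((n : Int) + (m : Int)) - ((dp.getD n []).getD m 0)

-- ===== PORT B =====
-- B's state: the explicit stack of (cell, ready) frames (head = top), the visited
-- set `expanded` and the memo dict.
structure BState where
  stack : List ((Nat × Nat) × Bool)
  expanded : PySem.Set (Nat × Nat)
  memo : PySem.Dict (Nat × Nat) Int
  deriving Repr

-- The ready-phase value of cell (i, j) (B's four branches, literally); the memo
-- reads use getD with default 0, never hit when the dependencies are memoized
-- (Python would raise KeyError there; the DFS order makes that unreachable).
def readyValB (al bl cl : List Char) (memo : PySem.Dict (Nat × Nat) Int) (i j : Nat) : Int :=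
  if i = 0 ∧ j = 0 then 0
  else if i = 0 then memo.getD (0, j-1) 0 + pvInd (bl.getD (j-1) ' ') (cl.getD (j-1) ' ')
  else if j = 0 then memo.getD (i-1, 0) 0 + pvInd (al.getD (i-1) ' ') (cl.getD (i-1) ' ')
  else max (memo.getD (i-1, j) 0 + pvInd (al.getD (i-1) ' ') (cl.getD (i+j-1) ' '))
           (memo.getD (i, j-1) 0 + pvInd (bl.getD (j-1) ' ') (cl.getD (i+j-1) ' '))

-- One iteration of B's while loop: pop a frame; skip if memoized; if ready, compute
-- and memoize; else, if unvisited, mark visited and push (cell, True) then the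
-- dependency frames ((i-1,j) then (i,j-1), so (i,j-1) pops first — Python's append order).
def stepB (al bl cl : List Char) (st : BState) : BState :=
  match st.stack with
  | [] => st
  | (p, ready) :: rest =>
    if st.memo.contains p then { st with stack := rest }
    else if ready then
      { st with stack := rest,
                memo := st.memo.insert p (readyValB al bl cl st.memo p.1 p.2) }
    else if st.expanded.contains p then { st with stack := rest }
    else
      { stack := (if 0 < p.2 then [((p.1, p.2-1), false)] else []) ++
                 (if 0 < p.1 then [((p.1-1, p.2), false)] else []) ++
                 ((p, true) :: rest),
        expanded := st.expanded.add p,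
        memo := st.memo }

-- B's while loop; the fuel is a totality guard only (the loop provably empties its
-- stack within 1 + 3·(n+1)·(m+1) iterations — see lemma phiB below), it adds no test
-- Python does not have: the loop stops exactly when the stack is empty.
def runB (al bl cl : List Char) : Nat → BState → BState
  | 0, st => st
  | fuel+1, st =>
    match st.stack with
    | [] => st
    | _ :: _ => runB al bl cl fuel (stepB al bl cl st)

-- Port of B: DFS from (n, m), then n + m - memo[(n, m)] (getD 0: KeyError unreachable).
def solve_alt (a : String) (b : String) (c : String) : Int :=
  let al := a.toList
  let bl := b.toList
  let cl := c.toList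
  let n := al.length
  let m := bl.length
  let fin := runB al bl cl (1 + 3*(n+1)*(m+1))
      ⟨[((n, m), false)], PySem.Set.empty, PySem.Dict.empty⟩
  ((n : Int) + (m : Int)) - fin.memo.getD (n, m) 0

-- ===== PRECONDITION & SPEC =====
-- Pre_: Python A raises IndexError at c[i+j-1] exactly when len(c) < len(a)+len(b);
-- on every other input A returns normally, so Pre_ is exact.
def Pre_solve (a : String) (b : String) (c : String) : Prop :=
  a.toList.length + b.toList.length ≤ c.toList.length
instance (a : String) (b : String) (c : String) : Decidable (Pre_solve a b c) := by
  unfold Pre_solve; infer_instance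

def pvWitness_solve : String × String × String := ("ab", "c", "cab")

def Spec_solve (a : String) (b : String) (c : String) (out : Int) : Prop := out = solve_alt a b c
instance (a : String) (b : String) (c : String) (out : Int) : Decidable (Spec_solve a b c out) := by
  unfold Spec_solve; infer_instance

-- ===== CLAIM (what is proved, stated in full; the proofs are below) =====
def Claim_equal_solve : Prop := ∀ (a : String) (b : String) (c : String),
  Dom_solve a b c → Pre_solve a b c → Spec_solve a b c (solve a b c)

-- ===== LEMMAS AND PROOFS =====

-- The common recurrence: pvG i j = max matched chars interleaving al[:i], bl[:j] into cl[:i+j].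
def pvG (al bl cl : List Char) : Nat → Nat → Int
  | 0, 0 => 0
  | 0, j+1 => pvG al bl cl 0 j + pvInd (bl.getD j ' ') (cl.getD j ' ')
  | i+1, 0 => pvG al bl cl i 0 + pvInd (al.getD i ' ') (cl.getD i ' ')
  | i+1, j+1 =>
      max (pvG al bl cl i (j+1) + pvInd (al.getD i ' ') (cl.getD (i+j+1) ' '))
          (pvG al bl cl (i+1) j + pvInd (bl.getD j ' ') (cl.getD (i+j+1) ' '))
  termination_by i j => i + j

lemma pvG_zero_zero (al bl cl : List Char) : pvG al bl cl 0 0 = 0 := by rw [pvG]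

lemma pvG_zero_succ (al bl cl : List Char) (j : Nat) :
    pvG al bl cl 0 (j+1) = pvG al bl cl 0 j + pvInd (bl.getD j ' ') (cl.getD j ' ') := by
  rw [pvG]

lemma pvG_succ_zero (al bl cl : List Char) (i : Nat) :
    pvG al bl cl (i+1) 0 = pvG al bl cl i 0 + pvInd (al.getD i ' ') (cl.getD i ' ') := by
  rw [pvG]

lemma pvG_succ_succ (al bl cl : List Char) (i j : Nat) :
    pvG al bl cl (i+1) (j+1)
      = max (pvG al bl cl i (j+1) + pvInd (al.getD i ' ') (cl.getD (i+j+1) ' '))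
            (pvG al bl cl (i+1) j + pvInd (bl.getD j ' ') (cl.getD (i+j+1) ' ')) := by
  rw [pvG]

-- cell (i,j) of A's table
def cellA (dp : List (List Int)) (i j : Nat) : Int := (dp.getD i []).getD j 0

lemma getD_set_list (l : List (List Int)) (i k : Nat) (r : List Int) :
    (l.set i r).getD k [] = if k = i ∧ i < l.length then r else l.getD k [] := by
  simp only [List.getD_eq_getElem?_getD, List.getElem?_set]
  by_cases h1 : i = k
  · subst h1
    by_cases h2 : i < l.length <;> simp [h2]
  · have h1' : ¬ k = i := fun h => h1 h.symm
    simp [h1, h1']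

lemma getD_set_int (l : List Int) (j k : Nat) (v : Int) :
    (l.set j v).getD k 0 = if k = j ∧ j < l.length then v else l.getD k 0 := by
  simp only [List.getD_eq_getElem?_getD, List.getElem?_set]
  by_cases h1 : j = k
  · subst h1
    by_cases h2 : j < l.length <;> simp [h2]
  · have h1' : ¬ k = j := fun h => h1 h.symm
    simp [h1, h1']

-- A's inner loop over j ∈ range l fills row i with pvG, leaves other rows alone.
lemma innerA (al bl cl : List Char) (n m i : Nat) (hi : i ≤ n) :
    ∀ (l : Nat), l ≤ m + 1 → ∀ (dp : List (List Int)),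
    dp.length = n + 1 → (∀ k < n + 1, (dp.getD k []).length = m + 1) →
    (0 < i → ∀ j ≤ m, cellA dp (i-1) j = pvG al bl cl (i-1) j) →
    ((List.range l).foldl (rowStepA al bl cl i) dp).length = n + 1 ∧
    (∀ k < n + 1, (((List.range l).foldl (rowStepA al bl cl i) dp).getD k []).length = m + 1) ∧
    (∀ k, k ≠ i → ∀ j, cellA ((List.range l).foldl (rowStepA al bl cl i) dp) k j = cellA dp k j) ∧
    (∀ j < l, cellA ((List.range l).foldl (rowStepA al bl cl i) dp) i j = pvG al bl cl i j) := by
  intro l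
  induction l with
  | zero =>
    intro _ dp hlen hrow hprev
    exact ⟨hlen, hrow, fun _ _ _ => rfl, fun j hj => absurd hj (by omega)⟩
  | succ l ihl =>
    intro hl dp hlen hrow hprev
    rw [List.range_succ, List.foldl_append, List.foldl_cons, List.foldl_nil]
    obtain ⟨L1, L2, L3, L4⟩ := ihl (by omega) dp hlen hrow hprev
    set dp' := (List.range l).foldl (rowStepA al bl cl i) dp with hdp'
    have hrowlen : (dp'.getD i []).length = m + 1 := L2 i (by omega)
    have hiltd : i < dp'.length := by omega
    -- the freshly computed value equals pvG i l
    have hv :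
        (if i = 0 ∧ l = 0 then (0 : Int)
         else if i = 0 then
           (dp'.getD i []).getD (l-1) 0 + pvInd (bl.getD (l-1) ' ') (cl.getD (i+l-1) ' ')
         else if l = 0 then
           (dp'.getD (i-1) []).getD l 0 + pvInd (al.getD (i-1) ' ') (cl.getD (i+l-1) ' ')
         else
           max ((dp'.getD (i-1) []).getD l 0 + pvInd (al.getD (i-1) ' ') (cl.getD (i+l-1) ' '))
               ((dp'.getD i []).getD (l-1) 0 + pvInd (bl.getD (l-1) ' ') (cl.getD (i+l-1) ' ')))
          = pvG al bl cl i l := by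
      by_cases hi0 : i = 0
      · subst hi0
        by_cases hl0 : l = 0
        · subst hl0; simp [pvG_zero_zero]
        · obtain ⟨l', rfl⟩ : ∃ l', l = l' + 1 := ⟨l - 1, by omega⟩
          have := L4 l' (by omega)
          simp only [cellA] at this
          rw [if_neg (by omega), if_pos rfl, Nat.add_sub_cancel, Nat.zero_add,
            Nat.add_sub_cancel, this, pvG_zero_succ]
      · obtain ⟨i', rfl⟩ : ∃ i', i = i' + 1 := ⟨i - 1, by omega⟩
        by_cases hl0 : l = 0
        · subst hl0
          have hcell : cellA dp' i' 0 = cellA dp i' 0 := L3 i' (by omega) 0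
          have hpv : cellA dp i' 0 = pvG al bl cl i' 0 := hprev (by omega) 0 (by omega)
          simp only [cellA] at hcell hpv
          rw [if_neg (by omega), if_neg (by omega), if_pos rfl]
          simp only [show i' + 1 - 1 = i' from by omega]
          rw [hcell, hpv, pvG_succ_zero]
        · obtain ⟨l', rfl⟩ : ∃ l', l = l' + 1 := ⟨l - 1, by omega⟩
          have hcell : cellA dp' i' (l' + 1) = cellA dp i' (l' + 1) := L3 i' (by omega) (l' + 1)
          have hpv : cellA dp i' (l' + 1) = pvG al bl cl i' (l' + 1) :=
            hprev (by omega) (l' + 1) (by omega)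
          have hrowc := L4 l' (by omega)
          simp only [cellA] at hcell hpv hrowc
          rw [if_neg (by omega), if_neg (by omega), if_neg (by omega)]
          simp only [show i' + 1 - 1 = i' from by omega, show l' + 1 - 1 = l' from by omega,
            show i' + 1 + (l' + 1) - 1 = i' + l' + 1 from by omega]
          rw [hcell, hpv, hrowc, pvG_succ_succ]
    -- now the step: dp'' = dp'.set i ((dp'.getD i []).set l v)
    unfold rowStepA
    refine ⟨?_, ?_, ?_, ?_⟩
    · simpa using L1
    · intro k hk
      rw [getD_set_list]
      by_cases hki : k = i ∧ i < dp'.length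
      · rw [if_pos hki, List.length_set]; exact hrowlen
      · rw [if_neg hki]; exact L2 k hk
    · intro k hk j
      simp only [cellA]
      rw [getD_set_list, if_neg (by intro h; exact hk h.1)]
      have := L3 k hk j
      simp only [cellA] at this
      exact this
    · intro j hj
      simp only [cellA]
      rw [getD_set_list, if_pos ⟨rfl, hiltd⟩, getD_set_int]
      by_cases hjl : j = l
      · subst hjl
        rw [if_pos ⟨rfl, by omega⟩]
        exact hv
      · rw [if_neg (by intro h; exact hjl h.1)]
        have := L4 j (by omega)
        simp only [cellA] at this
        exact this

-- A's outer loop: after rows 0..k-1 are processed, they all hold pvG.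
lemma outerA (al bl cl : List Char) (n m : Nat) :
    ∀ (k : Nat), k ≤ n + 1 →
    (((List.range k).foldl
        (fun dp i => (List.range (m+1)).foldl (rowStepA al bl cl i) dp)
        (List.replicate (n+1) (List.replicate (m+1) (0 : Int)))).length = n + 1) ∧
    (∀ r < n + 1, (((List.range k).foldl
        (fun dp i => (List.range (m+1)).foldl (rowStepA al bl cl i) dp)
        (List.replicate (n+1) (List.replicate (m+1) (0 : Int)))).getD r []).length = m + 1) ∧
    (∀ i < k, ∀ j ≤ m, cellA ((List.range k).foldl
        (fun dp i => (List.range (m+1)).foldl (rowStepA al bl cl i) dp)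
        (List.replicate (n+1) (List.replicate (m+1) (0 : Int)))) i j = pvG al bl cl i j) := by
  intro k
  induction k with
  | zero =>
    intro _
    simp only [List.range_zero, List.foldl_nil]
    refine ⟨by simp, ?_, fun i hi => absurd hi (by omega)⟩
    intro r hr
    rw [List.getD_eq_getElem?_getD, List.getElem?_replicate, if_pos hr]
    simp
  | succ k ihk =>
    intro hk
    rw [List.range_succ (n := k), List.foldl_append, List.foldl_cons, List.foldl_nil]
    obtain ⟨K1, K2, K3⟩ := ihk (by omega)
    set dp' := (List.range k).foldl
        (fun dp i => (List.range (m+1)).foldl (rowStepA al bl cl i) dp)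
        (List.replicate (n+1) (List.replicate (m+1) (0 : Int))) with hdp'
    have hprev : 0 < k → ∀ j ≤ m, cellA dp' (k-1) j = pvG al bl cl (k-1) j :=
      fun hk0 j hj => K3 (k-1) (by omega) j hj
    obtain ⟨I1, I2, I3, I4⟩ := innerA al bl cl n m k (by omega) (m+1) le_rfl dp' K1 K2 hprev
    refine ⟨I1, I2, ?_⟩
    intro i hi j hj
    by_cases hik : i = k
    · subst hik; exact I4 j (by omega)
    · rw [I3 i hik j]; exact K3 i (by omega) j hj

-- ======= B-side proof =======

-- size of a cell (its anti-diagonal index)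
def szC (p : Nat × Nat) : Nat := p.1 + p.2

-- the dependency cells a frame pushes (and exactly the memo reads of readyValB)
def depsOf (p : Nat × Nat) : List (Nat × Nat) :=
  (if 0 < p.1 then [(p.1 - 1, p.2)] else []) ++ (if 0 < p.2 then [(p.1, p.2 - 1)] else [])

-- a dependency d is "ready" relative to a (p,true) frame with prefix l1 above it
def ReadyB (memo : PySem.Dict (Nat × Nat) Int) (expanded : PySem.Set (Nat × Nat))
    (stack l1 : List ((Nat × Nat) × Bool)) (d : Nat × Nat) : Prop :=
  memo.contains d = true ∨ (d, true) ∈ stack ∨ ((d, false) ∈ l1 ∧ d ∉ expanded)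

-- the loop invariant of B's DFS
def InvB (n m : Nat) (al bl cl : List Char) (st : BState) : Prop :=
  (∀ p v, st.memo.get? p = some v → v = pvG al bl cl p.1 p.2) ∧
  (∀ e ∈ st.stack, e.1.1 ≤ n ∧ e.1.2 ≤ m) ∧
  (∀ p ∈ st.expanded, p.1 ≤ n ∧ p.2 ≤ m) ∧
  st.expanded.Nodup ∧
  (∀ p, p ∈ st.expanded → st.memo.contains p = false → ((p, true) ∈ st.stack)) ∧
  (∀ l1 p l2, st.stack = l1 ++ ((p, true)) :: l2 → ∀ e ∈ l1, szC e.1 < szC p) ∧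
  (∀ l1 p l2, st.stack = l1 ++ ((p, true)) :: l2 →
      p ∈ st.expanded ∧ ∀ d ∈ depsOf p, ReadyB st.memo st.expanded st.stack l1 d) ∧
  (st.memo.contains (n, m) = true ∨ ((n, m), true) ∈ st.stack ∨
      (((n, m), false) ∈ st.stack ∧ (n, m) ∉ st.expanded))

-- the decreasing potential
def phiB (n m : Nat) (st : BState) : Nat :=
  st.stack.length + 3 * ((n+1) * (m+1) - st.expanded.length)


lemma mem_depsOf (d p : Nat × Nat) :
    d ∈ depsOf p ↔ (0 < p.1 ∧ d = (p.1 - 1, p.2)) ∨ (0 < p.2 ∧ d = (p.1, p.2 - 1)) := by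
  unfold depsOf
  split_ifs with h1 h2 h2 <;> simp_all

lemma szC_deps {d p : Nat × Nat} (h : d ∈ depsOf p) : szC d + 1 = szC p := by
  rcases (mem_depsOf d p).1 h with ⟨h1, rfl⟩ | ⟨h1, rfl⟩ <;> simp [szC] <;> omega

lemma splitF (xs s l1 l2 : List ((Nat × Nat) × Bool)) (q : Nat × Nat)
    (hxs : ∀ e ∈ xs, e.2 = false) (h : xs ++ s = l1 ++ ((q, true)) :: l2) :
    ∃ r1, s = r1 ++ ((q, true)) :: l2 ∧ l1 = xs ++ r1 := by
  induction xs generalizing l1 with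
  | nil => exact ⟨l1, by simpa using h, by simp⟩
  | cons x xs ih =>
    cases l1 with
    | nil =>
      simp only [List.cons_append, List.nil_append] at h
      injection h with h1 h2
      have := hxs x (by simp)
      rw [h1] at this
      simp at this
    | cons y l1' =>
      simp only [List.cons_append] at h
      injection h with h1 h2
      obtain ⟨r1, hr1, hr2⟩ := ih l1' (fun e he => hxs e (by simp [he])) h2
      exact ⟨r1, hr1, by simp [h1, hr2]⟩

lemma getD_correct (al bl cl : List Char) (memo : PySem.Dict (Nat × Nat) Int)
    (hcor : ∀ p v, memo.get? p = some v → v = pvG al bl cl p.1 p.2)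
    (d : Nat × Nat) (h : memo.contains d = true) : memo.getD d 0 = pvG al bl cl d.1 d.2 := by
  cases hg : memo.get? d with
  | none =>
    rw [PySem.Dict.get?_eq_none_iff_contains] at hg
    rw [h] at hg
    cases hg
  | some v =>
    rw [PySem.Dict.getD_of_get?_eq_some memo 0 hg]
    exact hcor d v hg

lemma readyVal_eq_pvG (al bl cl : List Char) (memo : PySem.Dict (Nat × Nat) Int) (i j : Nat)
    (hmem : ∀ d ∈ depsOf (i, j), memo.contains d = true)
    (hcor : ∀ p v, memo.get? p = some v → v = pvG al bl cl p.1 p.2) :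
    readyValB al bl cl memo i j = pvG al bl cl i j := by
  unfold readyValB
  match i, j with
  | 0, 0 => rw [if_pos ⟨rfl, rfl⟩, pvG_zero_zero]
  | 0, j+1 =>
    have hd : ((0 : Nat), j) ∈ depsOf (0, j+1) := by rw [mem_depsOf]; right; exact ⟨by omega, by simp⟩
    have := getD_correct al bl cl memo hcor _ (hmem _ hd)
    rw [if_neg (by omega), if_pos rfl, Nat.add_sub_cancel]
    rw [this, pvG_zero_succ]
  | i+1, 0 =>
    have hd : (i, (0 : Nat)) ∈ depsOf (i+1, 0) := by rw [mem_depsOf]; left; exact ⟨by omega, by simp⟩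
    have := getD_correct al bl cl memo hcor _ (hmem _ hd)
    rw [if_neg (by omega), if_neg (by omega), if_pos rfl, Nat.add_sub_cancel]
    rw [this, pvG_succ_zero]
  | i+1, j+1 =>
    have hd1 : (i, j+1) ∈ depsOf (i+1, j+1) := by rw [mem_depsOf]; left; exact ⟨by omega, by simp⟩
    have hd2 : (i+1, j) ∈ depsOf (i+1, j+1) := by rw [mem_depsOf]; right; exact ⟨by omega, by simp⟩
    have h1 := getD_correct al bl cl memo hcor _ (hmem _ hd1)
    have h2 := getD_correct al bl cl memo hcor _ (hmem _ hd2)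
    rw [if_neg (by omega), if_neg (by omega), if_neg (by omega)]
    simp only [Nat.add_sub_cancel, show i + 1 + (j + 1) - 1 = i + j + 1 from by omega]
    rw [h1, h2, pvG_succ_succ]

lemma expanded_card_le (n m : Nat) (s : PySem.Set (Nat × Nat)) (hnd : s.Nodup)
    (hg : ∀ p ∈ s, p.1 ≤ n ∧ p.2 ≤ m) : s.length ≤ (n+1) * (m+1) := by
  have hsub : s ⊆ List.product (List.range (n+1)) (List.range (m+1)) := by
    intro p hp
    obtain ⟨h1, h2⟩ := hg p hp
    rcases p with ⟨x, y⟩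
    simp only [List.pair_mem_product, List.mem_range]
    omega
  have hlen := (List.Nodup.subperm hnd hsub).length_le
  have : (List.product (List.range (n+1)) (List.range (m+1))).length = (n+1) * (m+1) := by
    show ((List.range (n+1)) ×ˢ (List.range (m+1))).length = (n+1)*(m+1)
    rw [List.length_product]
    simp
  omega

lemma stepB_spec (n m : Nat) (al bl cl : List Char) (st : BState)
    (hne : st.stack ≠ []) (hinv : InvB n m al bl cl st) :
    InvB n m al bl cl (stepB al bl cl st) ∧ phiB n m (stepB al bl cl st) < phiB n m st := by
  obtain ⟨A1, A2, A3, A4, A5, A6, A7, A8⟩ := hinv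
  rcases hs : st.stack with _ | ⟨⟨p, rdy⟩, rest⟩
  · exact absurd hs hne
  rw [hs] at A2 A5 A6 A7 A8
  have hred : stepB al bl cl st =
      (if st.memo.contains p then { st with stack := rest }
       else if rdy then
         { st with stack := rest,
                   memo := st.memo.insert p (readyValB al bl cl st.memo p.1 p.2) }
       else if st.expanded.contains p then { st with stack := rest }
       else
         { stack := ((if 0 < p.2 then [((p.1, p.2 - 1), false)] else []) ++
                    (if 0 < p.1 then [((p.1 - 1, p.2), false)] else [])) ++
                    ((p, true) :: rest),
           expanded := st.expanded.add p,
           memo := st.memo }) := by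
    rw [stepB.eq_def, hs]
  have hgridp : p.1 ≤ n ∧ p.2 ≤ m := A2 (p, rdy) (by simp)
  rw [hred]
  by_cases hc1 : st.memo.contains p = true
  · -- CASE 1: already memoized, pop
    rw [if_pos hc1]
    constructor
    · refine ⟨A1, fun e he => A2 e (by simp [he]), A3, A4, ?_, ?_, ?_, ?_⟩
      · intro q hq hqm
        have hh := A5 q hq hqm
        simp only [List.mem_cons] at hh
        rcases hh with heq | hm
        · injection heq with h1 h2
          rw [h1, hc1] at hqm
          cases hqm
        · exact hm
      · intro l1 q l2 h e he
        have h0 : rest = l1 ++ ((q, true)) :: l2 := h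
        exact A6 ((p, rdy) :: l1) q l2 (by rw [h0]; rfl) e (by simp [he])
      · intro l1 q l2 h
        have h0 : rest = l1 ++ ((q, true)) :: l2 := h
        obtain ⟨hexp, hready⟩ := A7 ((p, rdy) :: l1) q l2 (by rw [h0]; rfl)
        refine ⟨hexp, fun d hd => ?_⟩
        rcases hready d hd with h1 | h2 | h3
        · exact Or.inl h1
        · simp only [List.mem_cons] at h2
          rcases h2 with heq | hm
          · injection heq with h1' h2'
            rw [h1']
            exact Or.inl hc1
          · exact Or.inr (Or.inl hm)
        · rcases h3 with ⟨hm, hne'⟩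
          simp only [List.mem_cons] at hm
          rcases hm with heq | hm
          · injection heq with h1' h2'
            rw [h1']
            exact Or.inl hc1
          · exact Or.inr (Or.inr ⟨hm, hne'⟩)
      · rcases A8 with h | h | h
        · exact Or.inl h
        · simp only [List.mem_cons] at h
          rcases h with heq | hm
          · injection heq with h1' h2'
            rw [h1']
            exact Or.inl hc1
          · exact Or.inr (Or.inl hm)
        · rcases h with ⟨hm, hne'⟩
          simp only [List.mem_cons] at hm
          rcases hm with heq | hm
          · injection heq with h1' h2'
            rw [h1']
            exact Or.inl hc1
          · exact Or.inr (Or.inr ⟨hm, hne'⟩)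
    · simp only [phiB, hs, List.length_cons]
      omega
  · rw [if_neg hc1]
    by_cases hrdy : rdy = true
    · -- CASE 2: ready frame, compute and memoize
      rw [if_pos hrdy]
      rw [hrdy] at A5 A6 A7 A8 hs
      obtain ⟨hexp_p, hready_p⟩ := A7 [] p rest (by simp)
      have hdeps : ∀ d ∈ depsOf p, st.memo.contains d = true := by
        intro d hd
        rcases hready_p d hd with h1 | h2 | h3
        · exact h1
        · simp only [List.mem_cons] at h2
          rcases h2 with heq | hm
          · injection heq with h1' h2'
            have hsz := szC_deps hd
            rw [h1'] at hsz
            omega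
          · obtain ⟨s1, s2, hsplit⟩ := List.append_of_mem hm
            have hA6 := A6 ((p, true) :: s1) d s2 (by rw [hsplit]; rfl) (p, true) (by simp)
            have hsz := szC_deps hd
            simp only [szC] at hA6 hsz
            omega
        · exact absurd h3.1 (List.not_mem_nil)
      have hval : readyValB al bl cl st.memo p.1 p.2 = pvG al bl cl p.1 p.2 :=
        readyVal_eq_pvG al bl cl st.memo p.1 p.2 (fun d hd => hdeps d hd) A1
      constructor
      · refine ⟨?_, fun e he => A2 e (by simp [he]), A3, A4, ?_, ?_, ?_, ?_⟩
        · intro q w hw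
          rw [PySem.Dict.get?_insert] at hw
          by_cases hq : q = p
          · subst hq
            rw [if_pos rfl] at hw
            injection hw with h1
            rw [← h1, hval]
          · rw [if_neg hq] at hw
            exact A1 q w hw
        · intro q hq hqm
          have hqp : q ≠ p := by
            intro h
            subst h
            rw [PySem.Dict.contains_insert] at hqm
            simp at hqm
          have hold : st.memo.contains q = false := by
            rw [PySem.Dict.contains_insert] at hqm
            simp only [Bool.or_eq_false_iff] at hqm
            exact hqm.2
          have hh := A5 q hq hold
          simp only [List.mem_cons] at hh
          rcases hh with heq | hm
          · injection heq with h1 h2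
            exact absurd h1 hqp
          · exact hm
        · intro l1 q l2 h e he
          have h0 : rest = l1 ++ ((q, true)) :: l2 := h
          exact A6 ((p, true) :: l1) q l2 (by rw [h0]; rfl) e (by simp [he])
        · intro l1 q l2 h
          have h0 : rest = l1 ++ ((q, true)) :: l2 := h
          obtain ⟨hexp, hready⟩ := A7 ((p, true) :: l1) q l2 (by rw [h0]; rfl)
          refine ⟨hexp, fun d hd => ?_⟩
          rcases hready d hd with h1 | h2 | h3
          · left
            rw [PySem.Dict.contains_insert, h1]
            simp
          · simp only [List.mem_cons] at h2
            rcases h2 with heq | hm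
            · injection heq with h1' h2'
              left
              rw [PySem.Dict.contains_insert, h1']
              simp
            · exact Or.inr (Or.inl hm)
          · rcases h3 with ⟨hm, hne'⟩
            simp only [List.mem_cons] at hm
            rcases hm with heq | hm
            · injection heq with h1' h2'
              cases h2'
            · exact Or.inr (Or.inr ⟨hm, hne'⟩)
        · rcases A8 with h | h | h
          · left
            rw [PySem.Dict.contains_insert, h]
            simp
          · simp only [List.mem_cons] at h
            rcases h with heq | hm
            · injection heq with h1' h2'
              left
              rw [PySem.Dict.contains_insert, h1']
              simp
            · exact Or.inr (Or.inl hm)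
          · rcases h with ⟨hm, hne'⟩
            simp only [List.mem_cons] at hm
            rcases hm with heq | hm
            · injection heq with h1' h2'
              cases h2'
            · exact Or.inr (Or.inr ⟨hm, hne'⟩)
      · simp only [phiB, hs, List.length_cons]
        omega
    · rw [if_neg hrdy]
      by_cases hc3 : st.expanded.contains p = true
      · -- CASE 3: unready frame of a visited cell, pop
        rw [if_pos hc3]
        have hrdyf : rdy = false := by
          cases rdy
          · rfl
          · exact absurd rfl hrdy
        rw [hrdyf] at A5 A6 A7 A8 hs
        have hpexp : p ∈ st.expanded := (PySem.Set.contains_iff _ _).1 hc3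
        constructor
        · refine ⟨A1, fun e he => A2 e (by simp [he, hrdyf]), A3, A4, ?_, ?_, ?_, ?_⟩
          · intro q hq hqm
            have hh := A5 q hq hqm
            simp only [List.mem_cons] at hh
            rcases hh with heq | hm
            · injection heq with h1 h2
              cases h2
            · exact hm
          · intro l1 q l2 h e he
            have h0 : rest = l1 ++ ((q, true)) :: l2 := h
            exact A6 ((p, false) :: l1) q l2 (by rw [h0]; rfl) e (by simp [he])
          · intro l1 q l2 h
            have h0 : rest = l1 ++ ((q, true)) :: l2 := h
            obtain ⟨hexp, hready⟩ := A7 ((p, false) :: l1) q l2 (by rw [h0]; rfl)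
            refine ⟨hexp, fun d hd => ?_⟩
            rcases hready d hd with h1 | h2 | h3
            · exact Or.inl h1
            · simp only [List.mem_cons] at h2
              rcases h2 with heq | hm
              · injection heq with h1' h2'
                cases h2'
              · exact Or.inr (Or.inl hm)
            · rcases h3 with ⟨hm, hne'⟩
              simp only [List.mem_cons] at hm
              rcases hm with heq | hm
              · injection heq with h1' h2'
                rw [h1'] at hne'
                exact absurd hpexp hne'
              · exact Or.inr (Or.inr ⟨hm, hne'⟩)
          · rcases A8 with h | h | h
            · exact Or.inl h
            · simp only [List.mem_cons] at h
              rcases h with heq | hm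
              · injection heq with h1' h2'
                cases h2'
              · exact Or.inr (Or.inl hm)
            · rcases h with ⟨hm, hne'⟩
              simp only [List.mem_cons] at hm
              rcases hm with heq | hm
              · injection heq with h1' h2'
                rw [h1'] at hne'
                exact absurd hpexp hne'
              · exact Or.inr (Or.inr ⟨hm, hne'⟩)
        · simp only [phiB, hs, List.length_cons]
          omega
      · -- CASE 4: expand a fresh cell
        rw [if_neg hc3]
        have hrdyf : rdy = false := by
          cases rdy
          · rfl
          · exact absurd rfl hrdy
        rw [hrdyf] at A5 A6 A7 A8 hs
        have hpnot : p ∉ st.expanded := fun h => hc3 ((PySem.Set.contains_iff _ _).2 h)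
        set dj := (if 0 < p.2 then [((p.1, p.2 - 1), false)] else []) with hdj
        set di := (if 0 < p.1 then [((p.1 - 1, p.2), false)] else []) with hdi
        have hframes : ∀ e ∈ dj ++ di, e.2 = false ∧ e.1 ∈ depsOf p := by
          intro e he
          rcases List.mem_append.1 he with h | h
          · rw [hdj] at h
            split_ifs at h with hp2
            · simp only [List.mem_singleton] at h
              subst h
              exact ⟨rfl, (mem_depsOf _ _).2 (Or.inr ⟨hp2, rfl⟩)⟩
            · simp at h
          · rw [hdi] at h
            split_ifs at h with hp1
            · simp only [List.mem_singleton] at h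
              subst h
              exact ⟨rfl, (mem_depsOf _ _).2 (Or.inl ⟨hp1, rfl⟩)⟩
            · simp at h
        have hdepsin : ∀ d ∈ depsOf p, (d, false) ∈ dj ++ di := by
          intro d hd
          rcases (mem_depsOf d p).1 hd with ⟨h1, rfl⟩ | ⟨h1, rfl⟩
          · refine List.mem_append.2 (Or.inr ?_)
            rw [hdi, if_pos h1]
            simp
          · refine List.mem_append.2 (Or.inl ?_)
            rw [hdj, if_pos h1]
            simp
        have hdne : ∀ d ∈ depsOf p, d ≠ p := by
          intro d hd h
          have := szC_deps hd
          rw [h] at this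
          omega
        have hexp' : st.expanded.add p = st.expanded ++ [p] := PySem.Set.add_of_not_mem hpnot
        have hmemT : ((p, true)) ∈ (dj ++ di) ++ ((p, true) :: rest) := by simp
        have hmemR : ∀ e ∈ rest, e ∈ (dj ++ di) ++ ((p, true) :: rest) := by
          intro e he
          simp [he]
        constructor
        · refine ⟨A1, ?_, ?_, PySem.Set.nodup_add _ _ A4, ?_, ?_, ?_, ?_⟩
          · intro e he
            simp only [List.mem_append, List.mem_cons] at he
            rcases he with (he | he) | he | he
            · obtain ⟨-, hdep⟩ := hframes e (List.mem_append.2 (Or.inl he))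
              rcases (mem_depsOf _ _).1 hdep with ⟨h1, h2⟩ | ⟨h1, h2⟩ <;>
                (rw [h2]; simp; omega)
            · obtain ⟨-, hdep⟩ := hframes e (List.mem_append.2 (Or.inr he))
              rcases (mem_depsOf _ _).1 hdep with ⟨h1, h2⟩ | ⟨h1, h2⟩ <;>
                (rw [h2]; simp; omega)
            · rw [he]
              exact hgridp
            · exact A2 e (by simp [he])
          · intro q hq
            rw [hexp'] at hq
            rcases List.mem_append.1 hq with h | h
            · exact A3 q h
            · simp only [List.mem_singleton] at h
              rw [h]
              exact hgridp
          · intro q hq hqm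
            rw [hexp'] at hq
            rcases List.mem_append.1 hq with hq' | hq'
            · have hh := A5 q hq' hqm
              simp only [List.mem_cons] at hh
              rcases hh with heq | hm
              · injection heq with h1 h2
                cases h2
              · exact hmemR _ hm
            · simp only [List.mem_singleton] at hq'
              rw [hq']
              exact hmemT
          · intro l1 q l2 h e he
            have h0 : (dj ++ di) ++ ((p, true) :: rest) = l1 ++ ((q, true)) :: l2 := h
            obtain ⟨r1, hr1, hr2⟩ := splitF (dj ++ di) _ l1 l2 q
              (fun e he => (hframes e he).1) h0
            rcases r1 with _ | ⟨y, r1⟩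
            · simp only [List.nil_append] at hr1
              injection hr1 with h1 h2
              injection h1 with hpq hb
              simp only [List.append_nil] at hr2
              rw [hr2] at he
              obtain ⟨-, hdep⟩ := hframes e he
              have := szC_deps hdep
              rw [hpq] at this
              omega
            · injection hr1 with h1 h2
              have hold := A6 ((p, false) :: r1) q l2 (by rw [h2]; rfl)
              have hpq : szC p < szC q := hold (p, false) (by simp)
              rw [hr2, ← h1] at he
              simp only [List.mem_append, List.mem_cons] at he
              rcases he with (he | he) | he | he
              · obtain ⟨-, hdep⟩ := hframes e (List.mem_append.2 (Or.inl he))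
                have := szC_deps hdep
                omega
              · obtain ⟨-, hdep⟩ := hframes e (List.mem_append.2 (Or.inr he))
                have := szC_deps hdep
                omega
              · rw [he]
                simpa [szC] using hpq
              · exact hold e (by simp [he])
          · intro l1 q l2 h
            have h0 : (dj ++ di) ++ ((p, true) :: rest) = l1 ++ ((q, true)) :: l2 := h
            obtain ⟨r1, hr1, hr2⟩ := splitF (dj ++ di) _ l1 l2 q
              (fun e he => (hframes e he).1) h0
            rcases r1 with _ | ⟨y, r1⟩
            · simp only [List.nil_append] at hr1
              injection hr1 with h1 h2
              injection h1 with hpq hb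
              simp only [List.append_nil] at hr2
              refine ⟨by rw [hexp', ← hpq]; simp, fun d hd => ?_⟩
              rw [← hpq] at hd
              by_cases hdm : st.memo.contains d = true
              · exact Or.inl hdm
              · by_cases hdex : d ∈ st.expanded
                · have hdf : st.memo.contains d = false := by
                    cases hcd : st.memo.contains d
                    · rfl
                    · exact absurd hcd hdm
                  have hh := A5 d hdex hdf
                  simp only [List.mem_cons] at hh
                  rcases hh with heq | hm
                  · injection heq with h1' h2'
                    cases h2'
                  · exact Or.inr (Or.inl (hmemR _ hm))
                · refine Or.inr (Or.inr ⟨?_, ?_⟩)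
                  · rw [hr2]
                    exact hdepsin d hd
                  · rw [hexp']
                    intro hmem
                    rcases List.mem_append.1 hmem with hmem' | hmem'
                    · exact hdex hmem'
                    · simp only [List.mem_singleton] at hmem'
                      exact hdne d hd hmem'
            · injection hr1 with h1 h2
              obtain ⟨hexpq, hreadyq⟩ := A7 ((p, false) :: r1) q l2 (by rw [h2]; rfl)
              refine ⟨by rw [hexp']; exact List.mem_append.2 (Or.inl hexpq), fun d hd => ?_⟩
              rcases hreadyq d hd with hq1 | hq2 | hq3
              · exact Or.inl hq1
              · simp only [List.mem_cons] at hq2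
                rcases hq2 with heq | hm
                · injection heq with h1' h2'
                  cases h2'
                · exact Or.inr (Or.inl (hmemR _ hm))
              · rcases hq3 with ⟨hm', hne'⟩
                simp only [List.mem_cons] at hm'
                rcases hm' with heq | hm'
                · injection heq with hdp hb'
                  refine Or.inr (Or.inl ?_)
                  rw [hdp]
                  exact hmemT
                · by_cases hdp : d = p
                  · refine Or.inr (Or.inl ?_)
                    rw [hdp]
                    exact hmemT
                  · refine Or.inr (Or.inr ⟨?_, ?_⟩)
                    · rw [hr2, ← h1]
                      simp [hm']
                    · rw [hexp']
                      intro hmem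
                      rcases List.mem_append.1 hmem with hmem' | hmem'
                      · exact hne' hmem'
                      · simp only [List.mem_singleton] at hmem'
                        exact hdp hmem'
          · rcases A8 with h | h | h
            · exact Or.inl h
            · simp only [List.mem_cons] at h
              rcases h with heq | hm
              · injection heq with h1' h2'
                cases h2'
              · exact Or.inr (Or.inl (hmemR _ hm))
            · rcases h with ⟨hm, hne'⟩
              simp only [List.mem_cons] at hm
              rcases hm with heq | hm
              · injection heq with h1' h2'
                refine Or.inr (Or.inl ?_)
                rw [h1']
                exact hmemT
              · by_cases hnp : (n, m) = p
                · refine Or.inr (Or.inl ?_)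
                  rw [hnp]
                  exact hmemT
                · refine Or.inr (Or.inr ⟨hmemR _ hm, ?_⟩)
                  rw [hexp']
                  intro hmem
                  rcases List.mem_append.1 hmem with hmem' | hmem'
                  · exact hne' hmem'
                  · simp only [List.mem_singleton] at hmem'
                    exact hnp hmem'
        · have hlen : (st.expanded.add p).length = st.expanded.length + 1 := by
            rw [hexp']
            simp
          have hgrid' : ∀ q ∈ st.expanded.add p, q.1 ≤ n ∧ q.2 ≤ m := by
            intro q hq
            rw [hexp'] at hq
            rcases List.mem_append.1 hq with h | h
            · exact A3 q h
            · simp only [List.mem_singleton] at h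
              rw [h]
              exact hgridp
          have hcard := expanded_card_le n m (st.expanded.add p) (PySem.Set.nodup_add _ _ A4) hgrid'
          have hdjl : dj.length ≤ 1 := by
            rw [hdj]
            split_ifs <;> simp
          have hdil : di.length ≤ 1 := by
            rw [hdi]
            split_ifs <;> simp
          have h3 : 3 * (n+1) * (m+1) = 3 * ((n+1) * (m+1)) := Nat.mul_assoc 3 (n+1) (m+1)
          simp only [phiB, hs, List.length_cons, List.length_append, hlen]
          omega

lemma runB_spec (n m : Nat) (al bl cl : List Char) :
    ∀ (fuel : Nat) (st : BState), InvB n m al bl cl st → phiB n m st ≤ fuel →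
    (runB al bl cl fuel st).stack = [] ∧ InvB n m al bl cl (runB al bl cl fuel st) := by
  intro fuel
  induction fuel with
  | zero =>
    intro st hinv hphi
    have hz : st.stack = [] := by
      have h1 : st.stack.length ≤ phiB n m st := Nat.le_add_right _ _
      have : st.stack.length = 0 := by omega
      exact List.eq_nil_of_length_eq_zero this
    simp [runB, hz, hinv]
  | succ fuel ih =>
    intro st hinv hphi
    match hstk : st.stack with
    | [] => simpa [runB, hstk] using hinv
    | e :: rest =>
      have hne : st.stack ≠ [] := by rw [hstk]; simp
      obtain ⟨h1, h2⟩ := stepB_spec n m al bl cl st hne hinv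
      have : runB al bl cl (fuel+1) st = runB al bl cl fuel (stepB al bl cl st) := by
        rw [runB]; rw [hstk]
      rw [this]
      exact ih (stepB al bl cl st) h1 (by omega)

lemma solveB_final (n m : Nat) (al bl cl : List Char) :
    (runB al bl cl (1 + 3*(n+1)*(m+1))
      ⟨[((n, m), false)], PySem.Set.empty, PySem.Dict.empty⟩).memo.getD (n, m) 0
      = pvG al bl cl n m := by
  have hinv0 : InvB n m al bl cl ⟨[((n, m), false)], PySem.Set.empty, PySem.Dict.empty⟩ := by
    refine ⟨?_, ?_, ?_, ?_, ?_, ?_, ?_, ?_⟩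
    · intro p v h
      simp [PySem.Dict.get?_empty] at h
    · intro e he
      simp only [List.mem_singleton] at he
      subst he
      simp
    · intro p hp
      simp [PySem.Set.empty] at hp
    · simp [PySem.Set.empty]
    · intro p hp
      simp [PySem.Set.empty] at hp
    · intro l1 p l2 h
      rcases l1 with _ | ⟨y, l1⟩ <;> simp_all
    · intro l1 p l2 h
      rcases l1 with _ | ⟨y, l1⟩ <;> simp_all
    · right; right
      refine ⟨by simp, by simp [PySem.Set.empty]⟩
  have hphi : phiB n m ⟨[((n, m), false)], PySem.Set.empty, PySem.Dict.empty⟩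
      ≤ 1 + 3*(n+1)*(m+1) := by
    have h3 : 3*((n+1)*(m+1)) = 3*(n+1)*(m+1) := (Nat.mul_assoc 3 (n+1) (m+1)).symm
    simp only [phiB, PySem.Set.empty, List.length_singleton, List.length_nil, Nat.sub_zero]
    omega
  obtain ⟨hemp, hinv⟩ := runB_spec n m al bl cl (1 + 3*(n+1)*(m+1)) _ hinv0 hphi
  obtain ⟨H1, -, -, -, -, -, -, H8⟩ := hinv
  rcases H8 with h | h | h
  · cases hg : (runB al bl cl (1 + 3*(n+1)*(m+1))
        ⟨[((n, m), false)], PySem.Set.empty, PySem.Dict.empty⟩).memo.get? (n, m) with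
    | none =>
      rw [PySem.Dict.get?_eq_none_iff_contains, h] at hg
      cases hg
    | some v =>
      rw [PySem.Dict.getD_of_get?_eq_some _ 0 hg]
      exact H1 (n, m) v hg
  · rw [hemp] at h
    simp at h
  · rw [hemp] at h
    simp at h

-- ===== VERDICT (by name: the statement is the Claim_ definition above) =====
theorem solve_spec : Claim_equal_solve := by
  intro a b c _ _
  obtain ⟨-, -, K3⟩ := outerA a.toList b.toList c.toList a.toList.length b.toList.length
      (a.toList.length + 1) le_rfl
  have hA := K3 a.toList.length (by omega) b.toList.length le_rfl
  simp only [cellA] at hA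
  have hB := solveB_final a.toList.length b.toList.length a.toList b.toList c.toList
  unfold Spec_solve solve solve_alt
  simp only [hA, hB]
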